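-- pv_equiv track=rewrite | github.com/pypi-data/pypi-mirror-392 | packages/mesomath/mesomath-1.2.2.tar.gz/mesomath-1.2.2/src/mesomath/babn.py | dec2list
-- ===== SOURCE A (Python) =====
-- def dec2list(n: int) -> list:
--     """
--     Convert decimal integer n to list of int's (its sexagesimal digits)
--
--     :n: Decimal integer to be converted
--     :ntype: int
--
--     """
--     if n < 60:
--         return [n]
--     else:
--         rlist = []
--         while n >= 60:
--             rlist.append(n % 60)
--             n = n // 60
--         if n > 0:
--             rlist.append(n)
--         rlist.reverse()
--     return rlist
-- ===== SOURCE B (Python) =====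
-- def dec2list(n: int) -> list:
--     """Recursive divide-by-60 formulation: recurse on n // 60, append n % 60."""
--     if n < 60:
--         return [n]
--     return dec2list(n // 60) + [n % 60]
-- ===== Notes on version B (the rewrite author's own statement) =====
-- stated objective: simpler
-- what changed: Replaced the explicit while-loop with an accumulator list, trailing append of the top digit, and final reverse by a direct recursion on the quotient that emits digits most-significant-first, keeping the same single-digit base case.
import Mathlib
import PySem

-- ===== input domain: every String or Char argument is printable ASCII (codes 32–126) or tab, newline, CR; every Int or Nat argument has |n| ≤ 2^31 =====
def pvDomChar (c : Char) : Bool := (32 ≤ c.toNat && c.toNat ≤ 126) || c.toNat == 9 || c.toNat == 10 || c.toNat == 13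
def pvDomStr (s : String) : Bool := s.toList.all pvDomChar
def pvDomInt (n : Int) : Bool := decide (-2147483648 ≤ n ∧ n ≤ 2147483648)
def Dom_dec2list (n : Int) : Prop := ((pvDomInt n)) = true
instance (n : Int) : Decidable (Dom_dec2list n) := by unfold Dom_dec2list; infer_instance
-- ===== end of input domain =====

-- B replaces A's while-loop + accumulator + final reverse by a direct recursion on n // 60 (objective: simpler).

-- termination helper used by both ports' recursion (cited in decreasing_by)
theorem pv_floordiv60_toNat_lt (n : Int) (h : 60 ≤ n) :
    (PySem.Int.floordiv n 60).toNat < n.toNat := by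
  rw [PySem.Int.floordiv_eq_ediv_of_pos (by omega : (0:Int) < 60)]
  omega

-- ===== PORT A =====
-- the Python while-loop: returns (final n, rlist)
def dec2listLoop (n : Int) (rlist : List Int) : Int × List Int :=
  if h : 60 ≤ n then
    dec2listLoop (PySem.Int.floordiv n 60) (rlist ++ [PySem.Int.mod n 60])
  else (n, rlist)
termination_by n.toNat
decreasing_by exact pv_floordiv60_toNat_lt n h

def dec2list (n : Int) : List Int :=
  if n < 60 then [n]
  else
    let p := dec2listLoop n []
    let rlist := if p.1 > 0 then p.2 ++ [p.1] else p.2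
    rlist.reverse

-- ===== PORT B =====
def dec2list_alt (n : Int) : List Int :=
  if h : n < 60 then [n]
  else dec2list_alt (PySem.Int.floordiv n 60) ++ [PySem.Int.mod n 60]
termination_by n.toNat
decreasing_by exact pv_floordiv60_toNat_lt n (by omega)

-- ===== PRECONDITION & SPEC =====
def Spec_dec2list (n : Int) (out : List Int) : Prop := out = dec2list_alt n
instance (n : Int) (out : List Int) : Decidable (Spec_dec2list n out) := by unfold Spec_dec2list; infer_instance

-- ===== CLAIM (what is proved, stated in full; the proofs are below) =====
def Claim_equal_dec2list : Prop := ∀ (n : Int), Dom_dec2list n → Spec_dec2list n (dec2list n)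

-- ===== LEMMAS AND PROOFS =====

-- loop invariant: for 1 ≤ n, reversing the accumulated digits (with the final
-- positive head appended) yields B's digits followed by the reversed accumulator
theorem pv_loop_key (k : Nat) : ∀ (n : Int), n.toNat = k → 1 ≤ n → ∀ (acc : List Int),
    (if (dec2listLoop n acc).1 > 0 then (dec2listLoop n acc).2 ++ [(dec2listLoop n acc).1]
     else (dec2listLoop n acc).2).reverse = dec2list_alt n ++ acc.reverse := by
  induction k using Nat.strong_induction_on with
  | _ k ih =>
    intro n hk hn acc
    by_cases h : 60 ≤ n
    · rw [dec2listLoop, dif_pos h]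
      have hq : 1 ≤ PySem.Int.floordiv n 60 := by
        rw [PySem.Int.floordiv_eq_ediv_of_pos (by omega : (0:Int) < 60)]
        omega
      have hlt := pv_floordiv60_toNat_lt n h
      rw [ih _ (hk ▸ hlt) _ rfl hq]
      conv_rhs => rw [dec2list_alt]
      rw [dif_neg (by omega : ¬ n < 60)]
      simp
    · rw [dec2listLoop, dif_neg h]
      simp only
      rw [if_pos (by omega : n > 0)]
      rw [dec2list_alt, dif_pos (by omega : n < 60)]
      simp

-- ===== VERDICT (by name: the statement is the Claim_ definition above) =====
theorem dec2list_spec : Claim_equal_dec2list := by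
  intro n _
  unfold Spec_dec2list
  by_cases h : n < 60
  · rw [dec2list, if_pos h, dec2list_alt, dif_pos h]
  · rw [dec2list, if_neg h]
    simp only
    have := pv_loop_key n.toNat n rfl (by omega) []
    simpa using this
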